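-- pv_equiv track=rewrite | github.com/Kosaaaaa/advent-of-code | aoc2023/day11/part2.py | parse_galaxies
-- ===== SOURCE A (Python) =====
-- EXPANSION = 1_000_000
--
-- def parse_galaxies(s: str, expansion: int = EXPANSION) -> list[tuple[int, int]]:
--     lines = s.splitlines()
--
--     empty_columns = [
--         all(line[i] == '.' for line in lines)
--         for i in range(len(lines[0]))
--     ]
--     galaxies = []
--     x, y = 0, 0
--
--     for line in lines:
--         x = 0
--         y += expansion if set(line) == {'.'} else 1
--         for i, element in enumerate(line):
--             x += expansion if empty_columns[i] else 1
--             if element == '#':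
--                 galaxies.append((x, y))
--
--     return galaxies
-- ===== SOURCE B (Python) =====
-- EXPANSION = 1_000_000
--
--
-- def parse_galaxies(s: str, expansion: int = EXPANSION) -> list[tuple[int, int]]:
--     lines = s.splitlines()
--
--     empty_columns = [
--         all(line[i] == '.' for line in lines)
--         for i in range(len(lines[0]))
--     ]
--
--     # prefix table of cumulative x coordinates, one entry per column
--     col_x, acc = [], 0
--     for e in empty_columns:
--         acc += expansion if e else 1
--         col_x.append(acc)
--
--     # prefix table of cumulative y coordinates, one entry per row
--     row_y, acc = [], 0
--     for line in lines:
--         acc += expansion if set(line) == {'.'} else 1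
--         row_y.append(acc)
--
--     return [(x, y)
--             for line, y in zip(lines, row_y)
--             for c, x in zip(line, col_x)
--             if c == '#']
-- ===== Notes on version B (the rewrite author's own statement) =====
-- stated objective: alternative
-- what changed: A threads running x/y accumulators through a row loop with a nested per-cell loop that conditionally appends; B precomputes two prefix-sum coordinate tables (col_x per column, row_y per row) and then emits galaxies with a single zip-based comprehension, no accumulator state in the emission pass.
import Mathlib
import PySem

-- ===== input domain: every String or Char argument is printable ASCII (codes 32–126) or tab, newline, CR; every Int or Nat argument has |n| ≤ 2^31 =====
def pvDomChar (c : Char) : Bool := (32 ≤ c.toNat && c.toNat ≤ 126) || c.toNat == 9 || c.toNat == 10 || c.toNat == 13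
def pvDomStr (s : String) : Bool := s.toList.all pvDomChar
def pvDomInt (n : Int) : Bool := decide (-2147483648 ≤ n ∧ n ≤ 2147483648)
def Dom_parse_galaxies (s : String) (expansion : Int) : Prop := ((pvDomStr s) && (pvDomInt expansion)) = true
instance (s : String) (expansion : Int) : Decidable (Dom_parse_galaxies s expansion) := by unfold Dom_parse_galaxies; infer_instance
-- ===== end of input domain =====

-- B replaces A's threaded x/y accumulators by two precomputed prefix coordinate tables and a zip-based emission pass (alternative decomposition, same cost).

-- ===== PORT A =====
-- 'expansion if set(line) == {'.'} else 1' (shared verbatim by both Pythons)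
def pgRowW (expansion : Int) (line : String) : Int :=
  if PySem.Set.equal (PySem.Set.ofList line.toList) (PySem.Set.ofList ['.']) then expansion else 1

-- empty_columns = [all(line[i] == '.' for line in lines) for i in range(width)]  (identical in A and B)
def pgEmptyCols (lines : List String) (width : Nat) : List Bool :=
  (List.range width).map (fun i => lines.all (fun line => PySem.Str.pyGet? line (Int.ofNat i) == some '.'))

-- body of A's inner 'for i, element in enumerate(line)' loop; empty_columns[i] is exact for i < width
-- (Pre_ guarantees that; Python raises IndexError beyond it, where pyGetD's default is never the claim's concern)
def pgInnerStep (expansion : Int) (ec : List Bool) (y : Int)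
    (st2 : Int × List (Int × Int)) (p : Int × Char) : Int × List (Int × Int) :=
  let x := st2.1 + (if PySem.List.pyGetD ec p.1 false then expansion else 1)
  (x, if p.2 == '#' then st2.2 ++ [(x, y)] else st2.2)

-- body of A's 'for line in lines' loop over state (x, y, galaxies); x is reset to 0 first
def pgStepA (expansion : Int) (ec : List Bool)
    (st : Int × Int × List (Int × Int)) (line : String) : Int × Int × List (Int × Int) :=
  let y := st.2.1 + pgRowW expansion line
  let inner := (PySem.List.enumerate line.toList 0).foldl (pgInnerStep expansion ec y) (0, st.2.2)
  (inner.1, y, inner.2)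

def parse_galaxies (s : String) (expansion : Int) : List (Int × Int) :=
  let lines := PySem.Str.splitlines s
  let width := ((PySem.List.pyGet? lines 0).getD "").toList.length  -- len(lines[0]); Pre_ excludes lines = [] (IndexError)
  let ec := pgEmptyCols lines width
  (lines.foldl (pgStepA expansion ec) (0, 0, [])).2.2

-- ===== PORT B =====
-- body of B's col_x-building loop: acc += expansion if e else 1; col_x.append(acc)
def pgColStep (expansion : Int) (st : List Int × Int) (e : Bool) : List Int × Int :=
  let acc := st.2 + (if e then expansion else 1)
  (st.1 ++ [acc], acc)

-- body of B's row_y-building loop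
def pgRowStep (expansion : Int) (st : List Int × Int) (line : String) : List Int × Int :=
  let acc := st.2 + pgRowW expansion line
  (st.1 ++ [acc], acc)

def parse_galaxies_alt (s : String) (expansion : Int) : List (Int × Int) :=
  let lines := PySem.Str.splitlines s
  let width := ((PySem.List.pyGet? lines 0).getD "").toList.length
  let ec := pgEmptyCols lines width
  let colx := (ec.foldl (pgColStep expansion) ([], 0)).1
  let rowy := (lines.foldl (pgRowStep expansion) ([], 0)).1
  (lines.zip rowy).flatMap (fun p =>
    (p.1.toList.zip colx).filterMap (fun q => if q.1 == '#' then some (q.2, p.2) else none))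

-- ===== PRECONDITION & SPEC =====
-- Pre_ admits exactly the inputs on which Python A returns; excluded are only the raising ones:
-- empty input (lines[0] IndexError), a line longer than the first (empty_columns[i] IndexError),
-- and a line shorter than the first that all() reaches at some column i before any earlier line
-- shows a non-dot there (line[i] IndexError inside the empty_columns generator).
def Pre_parse_galaxies (s : String) (expansion : Int) : Prop :=
  PySem.Str.splitlines s ≠ [] ∧
  (∀ l ∈ PySem.Str.splitlines s,
      l.toList.length ≤ ((PySem.Str.splitlines s).headD "").toList.length) ∧
  (∀ i < ((PySem.Str.splitlines s).headD "").toList.length,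
    ∀ k < (PySem.Str.splitlines s).length,
      ((PySem.Str.splitlines s).getD k "").toList.length ≤ i →
      ∃ j < k, i < ((PySem.Str.splitlines s).getD j "").toList.length ∧
        ((PySem.Str.splitlines s).getD j "").toList.getD i ' ' ≠ '.')
instance (s : String) (expansion : Int) : Decidable (Pre_parse_galaxies s expansion) := by
  unfold Pre_parse_galaxies; infer_instance

def pvWitness_parse_galaxies : String × Int := ("#.\n..", 2)

def Spec_parse_galaxies (s : String) (expansion : Int) (out : List (Int × Int)) : Prop := out = parse_galaxies_alt s expansion
instance (s : String) (expansion : Int) (out : List (Int × Int)) : Decidable (Spec_parse_galaxies s expansion out) := by unfold Spec_parse_galaxies; infer_instance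

-- ===== CLAIM (what is proved, stated in full; the proofs are below) =====
def Claim_equal_parse_galaxies : Prop := ∀ (s : String) (expansion : Int), Dom_parse_galaxies s expansion → Pre_parse_galaxies s expansion → Spec_parse_galaxies s expansion (parse_galaxies s expansion)

-- ===== LEMMAS AND PROOFS =====

-- column/cell weight: the amount x (resp. y) advances
def pgWt (expansion : Int) (e : Bool) : Int := if e then expansion else 1

-- prefix-sum table: pgPfx f xs acc = [acc + f x0, acc + f x0 + f x1, …]
def pgPfx {α : Type} (f : α → Int) : List α → Int → List Int
  | [], _ => []
  | a :: t, acc => (acc + f a) :: pgPfx f t (acc + f a)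

-- galaxies contributed by one row at height y
def pgPicks (cs : List Char) (colx : List Int) (y : Int) : List (Int × Int) :=
  (cs.zip colx).filterMap (fun q => if q.1 == '#' then some (q.2, y) else none)

-- the common reference value: rows emitted in order, each with its cumulative y
def pgBspec (expansion : Int) (ec : List Bool) : List String → Int → List (Int × Int)
  | [], _ => []
  | l :: t, y0 =>
      pgPicks l.toList (pgPfx (pgWt expansion) ec 0) (y0 + pgRowW expansion l)
        ++ pgBspec expansion ec t (y0 + pgRowW expansion l)

theorem pgEnumShift {α : Type} (xs : List α) (k : Int) :
    PySem.List.enumerate xs (k + 1) = (PySem.List.enumerate xs k).map (fun p => (p.1 + 1, p.2)) := by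
  induction xs generalizing k with
  | nil => simp [PySem.List.enumerate_nil]
  | cons x t ih => simp [PySem.List.enumerate_cons, ih (k + 1)]

theorem pgBuild {α : Type} (f : α → Int) (step : List Int × Int → α → List Int × Int)
    (hstep : ∀ st a, step st a = (st.1 ++ [st.2 + f a], st.2 + f a)) :
    ∀ (xs : List α) (pre : List Int) (acc : Int),
      xs.foldl step (pre, acc) = (pre ++ pgPfx f xs acc, acc + (xs.map f).sum) := by
  intro xs
  induction xs with
  | nil => intro pre acc; simp [pgPfx]
  | cons a t ih =>
      intro pre acc
      simp only [List.foldl_cons, hstep, ih, pgPfx, List.map_cons, List.sum_cons]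
      simp [List.append_assoc, add_assoc]

theorem pgInner (expansion y : Int) :
    ∀ (cs : List Char) (ec : List Bool) (x0 : Int) (g : List (Int × Int)),
      cs.length ≤ ec.length →
      (PySem.List.enumerate cs 0).foldl (pgInnerStep expansion ec y) (x0, g)
        = (x0 + ((ec.take cs.length).map (pgWt expansion)).sum,
           g ++ pgPicks cs (pgPfx (pgWt expansion) ec x0) y) := by
  intro cs
  induction cs with
  | nil => intro ec x0 g _; simp [PySem.List.enumerate_nil, pgPicks]
  | cons c t ih =>
      intro ec x0 g hlen
      cases ec with
      | nil => simp at hlen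
      | cons e ec' =>
          have hshift : PySem.List.enumerate t 1
              = (PySem.List.enumerate t 0).map (fun p => (p.1 + 1, p.2)) := by
            simpa using pgEnumShift t 0
          rw [PySem.List.enumerate_cons, List.foldl_cons]
          simp only [zero_add]
          rw [hshift, List.foldl_map]
          have hcong :
              ∀ (st : Int × List (Int × Int)), ∀ p ∈ PySem.List.enumerate t 0,
                pgInnerStep expansion (e :: ec') y st ((fun p => (p.1 + 1, p.2)) p)
                  = pgInnerStep expansion ec' y st p := by
            intro st p hp
            rcases (PySem.List.mem_enumerate_iff t 0 p).1 hp with ⟨k, hk, rfl⟩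
            simp only [pgInnerStep, zero_add]
            have : ((k : Int) + 1) = ((k + 1 : Nat) : Int) := by push_cast; ring
            rw [this, PySem.List.pyGetD_natCast, PySem.List.pyGetD_natCast]
            simp
          have hfirst : pgInnerStep expansion (e :: ec') y (x0, g) (0, c)
              = (x0 + pgWt expansion e, if c == '#' then g ++ [(x0 + pgWt expansion e, y)] else g) := by
            have h0 : ((0 : Nat) : Int) = (0 : Int) := by norm_num
            simp only [pgInnerStep, ← h0, PySem.List.pyGetD_natCast, List.getD_cons_zero, pgWt]
          rw [PySem.List.foldl_congr_mem _ _ _ _ hcong, hfirst]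
          have hlen' : t.length ≤ ec'.length := by simpa using hlen
          rw [ih ec' (x0 + pgWt expansion e) _ hlen']
          simp only [pgPfx, pgPicks, List.zip_cons_cons, List.filterMap_cons]
          by_cases hc : c = '#' <;>
            simp [hc, List.take_succ_cons, add_assoc, List.append_assoc]

theorem pgOuter (expansion : Int) (ec : List Bool) :
    ∀ (ls : List String) (x0 y0 : Int) (g : List (Int × Int)),
      (∀ l ∈ ls, l.toList.length ≤ ec.length) →
      ((ls.foldl (pgStepA expansion ec) (x0, y0, g)).2.2) = g ++ pgBspec expansion ec ls y0 := by
  intro ls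
  induction ls with
  | nil => intro x0 y0 g _; simp [pgBspec]
  | cons l t ih =>
      intro x0 y0 g hlen
      have hl : l.toList.length ≤ ec.length := hlen l (by simp)
      have ht : ∀ l' ∈ t, l'.toList.length ≤ ec.length := fun l' h => hlen l' (by simp [h])
      simp only [List.foldl_cons, pgStepA, pgInner expansion _ l.toList ec 0 g hl]
      rw [ih _ _ _ ht]
      simp [pgBspec, List.append_assoc]

theorem pgZip (expansion : Int) (ec : List Bool) (colx : List Int)
    (hcolx : colx = pgPfx (pgWt expansion) ec 0) :
    ∀ (ls : List String) (y0 : Int),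
      (ls.zip (pgPfx (pgRowW expansion) ls y0)).flatMap (fun p =>
          (p.1.toList.zip colx).filterMap (fun q => if q.1 == '#' then some (q.2, p.2) else none))
        = pgBspec expansion ec ls y0 := by
  intro ls
  induction ls with
  | nil => intro y0; simp [pgBspec, pgPfx]
  | cons l t ih =>
      intro y0
      subst hcolx
      simp only [pgPfx, List.zip_cons_cons, List.flatMap_cons]
      rw [ih]
      simp [pgBspec, pgPicks]

-- ===== VERDICT (by name: the statement is the Claim_ definition above) =====
theorem parse_galaxies_spec : Claim_equal_parse_galaxies := by
  intro s expansion _ hpre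
  unfold Spec_parse_galaxies
  obtain ⟨hne, hlen, _⟩ := hpre
  simp only [parse_galaxies, parse_galaxies_alt]
  have hec : (pgEmptyCols (PySem.Str.splitlines s)
      ((PySem.List.pyGet? (PySem.Str.splitlines s) 0).getD "").toList.length).length
      = ((PySem.List.pyGet? (PySem.Str.splitlines s) 0).getD "").toList.length := by
    simp [pgEmptyCols]
  have hhead : ((PySem.List.pyGet? (PySem.Str.splitlines s) 0).getD "")
      = (PySem.Str.splitlines s).headD "" := by
    cases h : PySem.Str.splitlines s with
    | nil => exact absurd h hne
    | cons a t =>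
        have h0 : ((0 : Nat) : Int) = (0 : Int) := by norm_num
        rw [← h0, PySem.List.pyGet?_natCast]
        simp
  have hlen' : ∀ l ∈ PySem.Str.splitlines s,
      l.toList.length ≤ (pgEmptyCols (PySem.Str.splitlines s)
        ((PySem.List.pyGet? (PySem.Str.splitlines s) 0).getD "").toList.length).length := by
    intro l hl
    rw [hec, hhead]
    exact hlen l hl
  rw [pgOuter expansion _ (PySem.Str.splitlines s) 0 0 [] hlen',
      pgBuild (pgWt expansion) (pgColStep expansion) (fun _ _ => rfl),
      pgBuild (pgRowW expansion) (pgRowStep expansion) (fun _ _ => rfl)]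
  simp only [List.nil_append]
  rw [pgZip expansion _ _ rfl]
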